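-- pv_equiv track=rewrite | github.com/jtajchman/TMS_Stimulation | sim/cell_visualization/cell_plotting.py | get_sec_bounds_idx
-- ===== SOURCE A (Python) =====
-- def get_sec_bounds_idx(k, max_idx):
--     """
--     Get the bounds of indexes in the segment-in-section list to include in the init vs. exclude in the ninit lists
--     """
--     incl_bounds = []
--     excl_bounds = []
--     for i, j in enumerate(k):
--         if i > 0 and j == k[i-1]+1: # Current bound extends the previous set
--             incl_bounds[-1][1] = j+2
--         else: # General case: add new set of bounds
--             bound = [j, j+2]
--             incl_bounds.append(bound)
--     for i, incl_bound in enumerate(incl_bounds):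
--         if i == 0 and incl_bound[0] > 0: # If there are idxs before first included lower bound
--             excl_bounds.append([0, incl_bound[0]+1]) # Exclude them
--         if i < len(incl_bounds)-1: # If there are more components to the included bounds
--             excl_bounds.append([incl_bound[1]-1, incl_bounds[i+1][0]+1]) # Exclude the space between bounds
--         elif incl_bound[1] != max_idx+1: # If there are idxs after last included upper bound
--             excl_bounds.append([incl_bound[1]-1, max_idx+1]) # Exclude them
--     return incl_bounds, excl_bounds
-- ===== SOURCE B (Python) =====
-- def get_sec_bounds_idx(k, max_idx):
--     """Single pass over k: maintain the current included run and emit excluded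
--     gaps as soon as a run closes, instead of a second pass over the intervals."""
--     incl = []
--     excl = []
--     cur = None  # current included interval (lo, hi)
--     prev = None  # previous element of k
--     for j in k:
--         if cur is None:
--             if j > 0:
--                 excl.append([0, j + 1])
--             cur = (j, j + 2)
--         elif j == prev + 1:
--             cur = (cur[0], j + 2)
--         else:
--             lo, hi = cur
--             incl.append([lo, hi])
--             excl.append([hi - 1, j + 1])
--             cur = (j, j + 2)
--         prev = j
--     if cur is not None:
--         lo, hi = cur
--         incl.append([lo, hi])
--         if hi != max_idx + 1:
--             excl.append([hi - 1, max_idx + 1])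
--     return incl, excl
-- ===== Notes on version B (the rewrite author's own statement) =====
-- stated objective: simpler
-- what changed: B fuses A's two passes (build included intervals, then re-scan them with index lookups to derive the excluded gaps) into a single pass over k that maintains the current run and emits each excluded gap the moment a run closes.
import Mathlib
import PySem

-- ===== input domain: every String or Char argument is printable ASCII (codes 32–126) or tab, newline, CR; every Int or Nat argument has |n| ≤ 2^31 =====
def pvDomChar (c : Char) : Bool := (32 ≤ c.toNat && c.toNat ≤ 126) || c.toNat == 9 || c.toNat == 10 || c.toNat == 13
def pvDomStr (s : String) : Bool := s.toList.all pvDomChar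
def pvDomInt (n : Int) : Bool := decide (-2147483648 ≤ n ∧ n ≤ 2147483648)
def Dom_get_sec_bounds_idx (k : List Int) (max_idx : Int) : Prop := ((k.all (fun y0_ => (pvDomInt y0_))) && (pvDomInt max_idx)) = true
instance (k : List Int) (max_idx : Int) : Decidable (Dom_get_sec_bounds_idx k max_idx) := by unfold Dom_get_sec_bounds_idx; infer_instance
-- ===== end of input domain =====

-- B fuses A's two passes into one pass over k, emitting each excluded gap as soon as an included run closes (objective: simpler, one traversal instead of two).

-- ===== PORT A =====
-- b[1] = v  (bound lists always have exactly two elements, so this is exact)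
def pvSetIdx1 (b : List Int) (v : Int) : List Int :=
  match b with
  | x :: _ :: rest => x :: v :: rest
  | other => other

-- incl_bounds[-1][1] = v  (the loop only runs it on a nonempty list)
def pvSetLast1 : List (List Int) → Int → List (List Int)
  | [], _ => []
  | [b], v => [pvSetIdx1 b v]
  | b :: c :: rest, v => b :: pvSetLast1 (c :: rest) v

-- body of A's first loop (all list subscripts below are in range in Python, so pyGetD with a default is exact)
def pvStepA1 (k : List Int) (acc : List (List Int)) (ij : Int × Int) : List (List Int) :=
  if ij.1 > 0 ∧ ij.2 = PySem.List.pyGetD k (ij.1 - 1) 0 + 1 then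
    pvSetLast1 acc (ij.2 + 2)
  else
    acc ++ [[ij.2, ij.2 + 2]]

-- body of A's second loop
def pvStepA2 (incl_bounds : List (List Int)) (max_idx : Int)
    (acc : List (List Int)) (p : Int × List Int) : List (List Int) :=
  let acc := if p.1 = 0 ∧ PySem.List.pyGetD p.2 0 0 > 0 then
      acc ++ [[0, PySem.List.pyGetD p.2 0 0 + 1]] else acc
  if p.1 < (incl_bounds.length : Int) - 1 then
    acc ++ [[PySem.List.pyGetD p.2 1 0 - 1,
             PySem.List.pyGetD (PySem.List.pyGetD incl_bounds (p.1 + 1) []) 0 0 + 1]]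
  else if PySem.List.pyGetD p.2 1 0 ≠ max_idx + 1 then
    acc ++ [[PySem.List.pyGetD p.2 1 0 - 1, max_idx + 1]]
  else acc

def get_sec_bounds_idx (k : List Int) (max_idx : Int) : List (List Int) × List (List Int) :=
  let incl_bounds := (PySem.List.enumerate k 0).foldl (pvStepA1 k) []
  let excl_bounds := (PySem.List.enumerate incl_bounds 0).foldl (pvStepA2 incl_bounds max_idx) []
  (incl_bounds, excl_bounds)

-- ===== PORT B =====
-- loop body of Source B: state = (current interval, previous element, incl, excl)
def pvStepB (st : Option (Int × Int) × Int × List (List Int) × List (List Int)) (j : Int) :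
    Option (Int × Int) × Int × List (List Int) × List (List Int) :=
  match st with
  | (none, _, incl, excl) =>
      (some (j, j + 2), j, incl, if j > 0 then excl ++ [[0, j + 1]] else excl)
  | (some (lo, hi), prev, incl, excl) =>
      if j = prev + 1 then (some (lo, j + 2), j, incl, excl)
      else (some (j, j + 2), j, incl ++ [[lo, hi]], excl ++ [[hi - 1, j + 1]])

-- code of Source B after the loop
def pvFinishB (max_idx : Int) (st : Option (Int × Int) × Int × List (List Int) × List (List Int)) :
    List (List Int) × List (List Int) :=
  match st with
  | (none, _, incl, excl) => (incl, excl)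
  | (some (lo, hi), _, incl, excl) =>
      (incl ++ [[lo, hi]], if hi ≠ max_idx + 1 then excl ++ [[hi - 1, max_idx + 1]] else excl)

def get_sec_bounds_idx_alt (k : List Int) (max_idx : Int) : List (List Int) × List (List Int) :=
  pvFinishB max_idx (k.foldl pvStepB (none, 0, [], []))

-- ===== PRECONDITION & SPEC =====
def Spec_get_sec_bounds_idx (k : List Int) (max_idx : Int) (out : List (List Int) × List (List Int)) : Prop := out = get_sec_bounds_idx_alt k max_idx
instance (k : List Int) (max_idx : Int) (out : List (List Int) × List (List Int)) : Decidable (Spec_get_sec_bounds_idx k max_idx out) := by unfold Spec_get_sec_bounds_idx; infer_instance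

-- ===== CLAIM (what is proved, stated in full; the proofs are below) =====
def Claim_equal_get_sec_bounds_idx : Prop := ∀ (k : List Int) (max_idx : Int), Dom_get_sec_bounds_idx k max_idx → Spec_get_sec_bounds_idx k max_idx (get_sec_bounds_idx k max_idx)

-- ===== LEMMAS AND PROOFS =====

-- the run decomposition: pvGo lo prev rest = the included intervals produced from
-- a current run starting at lo whose last element is prev, followed by rest
def pvGo (lo prev : Int) : List Int → List (List Int)
  | [] => [[lo, prev + 2]]
  | j :: rest => if j = prev + 1 then pvGo lo j rest else [lo, prev + 2] :: pvGo j j rest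

-- the excluded gaps between/after the included intervals (not the leading one)
def pvGt (m : Int) : List (List Int) → List (List Int)
  | [] => []
  | [b] => if PySem.List.pyGetD b 1 0 ≠ m + 1 then [[PySem.List.pyGetD b 1 0 - 1, m + 1]] else []
  | b :: c :: rest =>
      [PySem.List.pyGetD b 1 0 - 1, PySem.List.pyGetD c 0 0 + 1] :: pvGt m (c :: rest)

theorem pvSetLast1_append (acc : List (List Int)) (lo hi v : Int) :
    pvSetLast1 (acc ++ [[lo, hi]]) v = acc ++ [[lo, v]] := by
  induction acc with
  | nil => simp [pvSetLast1, pvSetIdx1]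
  | cons a acc ih =>
    cases acc with
    | nil => simp [pvSetLast1] at ih ⊢; exact ih
    | cons c acc => simpa [pvSetLast1] using ih

theorem pvGo_head (rest : List Int) (lo prev : Int) :
    ∃ h t, pvGo lo prev rest = [lo, h] :: t := by
  induction rest generalizing lo prev with
  | nil => exact ⟨prev + 2, [], rfl⟩
  | cons j rest ih =>
    by_cases hj : j = prev + 1
    · obtain ⟨h, t, ht⟩ := ih lo j
      refine ⟨h, t, ?_⟩
      simp only [pvGo]
      rw [if_pos hj]
      exact ht
    · exact ⟨prev + 2, pvGo j j rest, by simp [pvGo, hj]⟩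

theorem pvGt_cons_go (m a b j p : Int) (rest : List Int) :
    pvGt m ([a, b] :: pvGo j p rest) = [b - 1, j + 1] :: pvGt m (pvGo j p rest) := by
  obtain ⟨h, t, ht⟩ := pvGo_head rest j p
  rw [ht]
  simp [pvGt, PySem.List.pyGetD]

theorem pvGetD_of_drop {α : Type} [Inhabited α] (xs : List α) (n : Nat) (x : α) (t : List α)
    (h : xs.drop n = x :: t) : xs.getD n default = x := by
  have h1 : xs[n]? = some x := by
    rw [← List.head?_drop, h]; rfl
  simp [List.getD, h1]

-- A's first loop from index i on, with the current run's interval last in acc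
theorem pvFold1_suffix (k : List Int) (rest : List Int) (i : Int) (prev lo : Int)
    (acc : List (List Int)) (hi : 1 ≤ i) (hd : k.drop (i - 1).toNat = prev :: rest) :
    (PySem.List.enumerate rest i).foldl (pvStepA1 k) (acc ++ [[lo, prev + 2]])
    = acc ++ pvGo lo prev rest := by
  induction rest generalizing i prev lo acc with
  | nil => simp [PySem.List.enumerate_nil, pvGo]
  | cons j rest ih =>
    rw [PySem.List.enumerate_cons, List.foldl_cons]
    have hget : PySem.List.pyGetD k (i - 1) 0 = prev := by
      rw [PySem.List.pyGetD_of_nonneg k 0 (by omega)]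
      exact pvGetD_of_drop k (i - 1).toNat prev (j :: rest) hd
    have hd' : k.drop i.toNat = j :: rest := by
      have hn : i.toNat = (i - 1).toNat + 1 := by omega
      rw [hn, ← List.drop_drop, hd]
      rfl
    have hd'' : k.drop ((i + 1) - 1).toNat = j :: rest := by
      rw [show ((i + 1) - 1 : Int) = i by ring]; exact hd'
    simp only [pvStepA1]
    by_cases hj : j = prev + 1
    · rw [if_pos ⟨by omega, by rw [hget]; exact hj⟩, pvSetLast1_append]
      rw [ih (i + 1) j lo acc (by omega) hd'']
      simp only [pvGo]
      rw [if_pos hj]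
    · rw [if_neg (by rintro ⟨-, h2⟩; rw [hget] at h2; exact hj h2)]
      rw [ih (i + 1) j j (acc ++ [[lo, prev + 2]]) (by omega) hd'']
      simp only [pvGo]
      rw [if_neg hj]
      simp [List.append_assoc]

-- A's second loop from index i ≥ 1 on
theorem pvFold2_suffix (incl : List (List Int)) (m : Int) (rest : List (List Int))
    (b : List Int) (i : Int) (acc : List (List Int)) (hi : 1 ≤ i)
    (hd : incl.drop i.toNat = b :: rest) :
    (PySem.List.enumerate (b :: rest) i).foldl (pvStepA2 incl m) acc
    = acc ++ pvGt m (b :: rest) := by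
  induction rest generalizing b i acc with
  | nil =>
    rw [PySem.List.enumerate_cons, PySem.List.enumerate_nil, List.foldl_cons, List.foldl_nil]
    have hlen : incl.length = i.toNat + 1 := by
      have h1 : incl.length - i.toNat = 1 := by rw [← List.length_drop, hd]; rfl
      have h2 : i.toNat < incl.length := by
        by_contra hc
        rw [List.drop_eq_nil_of_le (by omega)] at hd
        exact absurd hd (by simp)
      omega
    simp only [pvStepA2]
    rw [if_neg (show ¬(i = 0 ∧ PySem.List.pyGetD b 0 0 > 0) from by rintro ⟨h0, -⟩; omega)]
    rw [if_neg (show ¬(i < (incl.length : Int) - 1) from by omega)]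
    by_cases hb : PySem.List.pyGetD b 1 0 ≠ m + 1
    · rw [if_pos hb]; simp [pvGt, hb]
    · rw [if_neg hb]; simp at hb; simp [pvGt, hb]
  | cons c rest ih =>
    rw [PySem.List.enumerate_cons, List.foldl_cons]
    have hlen : i.toNat + 2 ≤ incl.length := by
      have h1 : incl.length - i.toNat = rest.length + 2 := by
        rw [← List.length_drop, hd]; simp
      omega
    have hd' : incl.drop (i.toNat + 1) = c :: rest := by
      rw [← List.drop_drop, hd]; rfl
    have hc : PySem.List.pyGetD incl (i + 1) [] = c := by
      rw [PySem.List.pyGetD_of_nonneg incl [] (by omega)]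
      have hn : (i + 1).toNat = i.toNat + 1 := by omega
      rw [hn]
      exact pvGetD_of_drop incl (i.toNat + 1) c rest hd'
    simp only [pvStepA2]
    rw [if_neg (show ¬(i = 0 ∧ PySem.List.pyGetD b 0 0 > 0) from by rintro ⟨h0, -⟩; omega)]
    rw [if_pos (show i < (incl.length : Int) - 1 from by omega), hc]
    rw [ih c (i + 1) (acc ++ [[PySem.List.pyGetD b 1 0 - 1, PySem.List.pyGetD c 0 0 + 1]])
      (by omega) (by rw [show ((i + 1).toNat) = i.toNat + 1 from by omega]; exact hd')]
    rw [List.append_assoc]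
    rfl

-- B's loop with a live current run, plus the post-loop code
theorem pvFoldB_suffix (m : Int) (rest : List Int) (lo prev : Int)
    (incl excl : List (List Int)) :
    pvFinishB m (rest.foldl pvStepB (some (lo, prev + 2), prev, incl, excl))
    = (incl ++ pvGo lo prev rest, excl ++ pvGt m (pvGo lo prev rest)) := by
  induction rest generalizing lo prev incl excl with
  | nil =>
    simp only [List.foldl_nil, pvFinishB, pvGo, pvGt, PySem.List.pyGetD]
    by_cases hb : prev + 2 ≠ m + 1
    · simp [hb]
    · simp at hb; simp [hb]
  | cons j rest ih =>
    rw [List.foldl_cons]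
    by_cases hj : j = prev + 1
    · have hs : pvStepB (some (lo, prev + 2), prev, incl, excl) j
          = (some (lo, j + 2), j, incl, excl) := by simp [pvStepB, hj]
      rw [hs, ih lo j incl excl]
      simp [pvGo, hj]
    · have hs : pvStepB (some (lo, prev + 2), prev, incl, excl) j
          = (some (j, j + 2), j, incl ++ [[lo, prev + 2]], excl ++ [[prev + 2 - 1, j + 1]]) := by
        simp [pvStepB, hj]
      rw [hs, ih j j _ _]
      simp only [pvGo, if_neg hj, List.append_assoc, List.singleton_append, pvGt_cons_go]

theorem pvEq (k : List Int) (max_idx : Int) :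
    get_sec_bounds_idx k max_idx = get_sec_bounds_idx_alt k max_idx := by
  cases k with
  | nil => rfl
  | cons j rest =>
    unfold get_sec_bounds_idx get_sec_bounds_idx_alt
    dsimp only
    -- first loop of A
    rw [PySem.List.enumerate_cons, List.foldl_cons]
    have hstep0 : pvStepA1 (j :: rest) [] (0, j) = [] ++ [[j, j + 2]] := by
      simp [pvStepA1]
    rw [hstep0]
    rw [show (0 : Int) + 1 = 1 from rfl]
    rw [pvFold1_suffix (j :: rest) rest 1 j j [] (le_refl 1) (by simp)]
    rw [List.nil_append]
    -- B's loop
    rw [List.foldl_cons]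
    have hs : pvStepB (none, 0, [], []) j
        = (some (j, j + 2), j, [], if j > 0 then [] ++ [[0, j + 1]] else []) := rfl
    rw [hs, pvFoldB_suffix max_idx rest j j [] _]
    rw [List.nil_append]
    -- second loop of A
    obtain ⟨h, t, ht⟩ := pvGo_head rest j j
    rw [ht, PySem.List.enumerate_cons, List.foldl_cons]
    have hj0 : PySem.List.pyGetD ([j, h] : List Int) 0 0 = j := rfl
    have hj1 : PySem.List.pyGetD ([j, h] : List Int) 1 0 = h := rfl
    cases t with
    | nil =>
      rw [PySem.List.enumerate_nil, List.foldl_nil]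
      simp only [pvStepA2, hj0, hj1]
      rw [if_neg (show ¬((0:Int) < (([[j, h]] : List (List Int)).length : Int) - 1) from by norm_num)]
      by_cases hb : h ≠ max_idx + 1
      · rw [if_pos hb]
        by_cases hjp : j > 0 <;> simp [hjp, pvGt, hj1, hb]
      · rw [if_neg hb]; simp at hb
        subst hb
        by_cases hjp : j > 0 <;> simp [hjp, pvGt, hj1]
    | cons c t =>
      simp only [pvStepA2, hj0, hj1]
      rw [if_pos (show (0:Int) < ((([j, h] :: c :: t) : List (List Int)).length : Int) - 1 from by simp)]
      have hc : PySem.List.pyGetD ([j, h] :: c :: t) ((0 : Int) + 1) [] = c := by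
        norm_num [PySem.List.pyGetD, PySem.List.pyIdx?]
      rw [hc]
      rw [show (0 : Int) + 1 = 1 from rfl]
      rw [pvFold2_suffix ([j, h] :: c :: t) max_idx t c 1 _ (le_refl 1) (by simp)]
      by_cases hjp : j > 0 <;>
        simp [hjp, pvGt, hj1]

-- ===== VERDICT (by name: the statement is the Claim_ definition above) =====
theorem get_sec_bounds_idx_spec : Claim_equal_get_sec_bounds_idx := by
  intro k max_idx _
  unfold Spec_get_sec_bounds_idx
  exact pvEq k max_idx
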